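-- pv_equiv track=rewrite | github.com/f0rsan/Mely-AI | backend/app/services/dna_suggestions.py | _map_wd14_tags_to_fields
-- ===== SOURCE A (Python) =====
-- DNA_FIELD_ORDER = ("hairColor", "eyeColor", "skinTone", "bodyType", "style")
--
-- WD14_TAG_MAP: dict[str, dict[str, tuple[str, ...]]] = {
--     "hairColor": {
--         "黑色": ("black_hair",),
--         "棕色": ("brown_hair",),
--         "金色": ("blonde_hair",),
--         "银色": ("silver_hair", "grey_hair", "gray_hair"),
--         "粉色": ("pink_hair",),
--         "蓝色": ("blue_hair",),
--         "红色": ("red_hair",),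
--         "紫色": ("purple_hair",),
--         "白色": ("white_hair",),
--     },
--     "eyeColor": {
--         "棕色": ("brown_eyes",),
--         "蓝色": ("blue_eyes",),
--         "绿色": ("green_eyes",),
--         "红色": ("red_eyes",),
--         "紫色": ("purple_eyes", "violet_eyes"),
--         "金色": ("golden_eyes", "yellow_eyes"),
--         "灰色": ("gray_eyes", "grey_eyes"),
--     },
--     "skinTone": {
--         "白皙": ("fair_skin", "pale_skin"),
--         "自然": ("skin",),
--         "小麦色": ("tan_skin",),
--         "深色": ("dark_skin",),
--     },
--     "bodyType": {
--         "纤细": ("slim", "slender"),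
--         "匀称": ("average_build",),
--         "高挑": ("tall",),
--         "健美": ("muscular", "athletic"),
--         "娇小": ("petite", "short_stature"),
--     },
--     "style": {
--         "二次元": ("anime",),
--         "写实": ("realistic",),
--         "半写实": ("semi_realistic",),
--         "3D": ("3d", "render"),
--         "赛博朋克": ("cyberpunk",),
--         "国风": ("chinese_style", "ink_style"),
--     },
-- }
--
-- def _map_wd14_tags_to_fields(tags: list[str]) -> dict[str, str]:
--     lowered = {tag.lower() for tag in tags}
--     mapped: dict[str, str] = {}
--
--     for field_key in DNA_FIELD_ORDER:
--         tag_map = WD14_TAG_MAP[field_key]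
--         for value, aliases in tag_map.items():
--             if any(alias in lowered for alias in aliases):
--                 mapped[field_key] = value
--                 break
--
--     return mapped
-- ===== SOURCE B (Python) =====
-- DNA_FIELD_ORDER = ("hairColor", "eyeColor", "skinTone", "bodyType", "style")
--
-- # Inverted lookup: alias -> (field_key, value, priority), where priority is the
-- # value's position within its field in the original WD14 map (aliases are unique).
-- _ALIAS_INDEX: dict[str, tuple[str, str, int]] = {
--     "black_hair": ("hairColor", "黑色", 0),
--     "brown_hair": ("hairColor", "棕色", 1),
--     "blonde_hair": ("hairColor", "金色", 2),
--     "silver_hair": ("hairColor", "银色", 3),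
--     "grey_hair": ("hairColor", "银色", 3),
--     "gray_hair": ("hairColor", "银色", 3),
--     "pink_hair": ("hairColor", "粉色", 4),
--     "blue_hair": ("hairColor", "蓝色", 5),
--     "red_hair": ("hairColor", "红色", 6),
--     "purple_hair": ("hairColor", "紫色", 7),
--     "white_hair": ("hairColor", "白色", 8),
--     "brown_eyes": ("eyeColor", "棕色", 0),
--     "blue_eyes": ("eyeColor", "蓝色", 1),
--     "green_eyes": ("eyeColor", "绿色", 2),
--     "red_eyes": ("eyeColor", "红色", 3),
--     "purple_eyes": ("eyeColor", "紫色", 4),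
--     "violet_eyes": ("eyeColor", "紫色", 4),
--     "golden_eyes": ("eyeColor", "金色", 5),
--     "yellow_eyes": ("eyeColor", "金色", 5),
--     "gray_eyes": ("eyeColor", "灰色", 6),
--     "grey_eyes": ("eyeColor", "灰色", 6),
--     "fair_skin": ("skinTone", "白皙", 0),
--     "pale_skin": ("skinTone", "白皙", 0),
--     "skin": ("skinTone", "自然", 1),
--     "tan_skin": ("skinTone", "小麦色", 2),
--     "dark_skin": ("skinTone", "深色", 3),
--     "slim": ("bodyType", "纤细", 0),
--     "slender": ("bodyType", "纤细", 0),
--     "average_build": ("bodyType", "匀称", 1),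
--     "tall": ("bodyType", "高挑", 2),
--     "muscular": ("bodyType", "健美", 3),
--     "athletic": ("bodyType", "健美", 3),
--     "petite": ("bodyType", "娇小", 4),
--     "short_stature": ("bodyType", "娇小", 4),
--     "anime": ("style", "二次元", 0),
--     "realistic": ("style", "写实", 1),
--     "semi_realistic": ("style", "半写实", 2),
--     "3d": ("style", "3D", 3),
--     "render": ("style", "3D", 3),
--     "cyberpunk": ("style", "赛博朋克", 4),
--     "chinese_style": ("style", "国风", 5),
--     "ink_style": ("style", "国风", 5),
-- }
--
-- def _map_wd14_tags_to_fields(tags: list[str]) -> dict[str, str]: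
--     best: dict[str, tuple[str, int]] = {}
--     for tag in {t.lower() for t in tags}:
--         hit = _ALIAS_INDEX.get(tag)
--         if hit is None:
--             continue
--         field_key, value, prio = hit
--         cur = best.get(field_key)
--         if cur is None or prio < cur[1]:
--             best[field_key] = (value, prio)
--     return {f: best[f][0] for f in DNA_FIELD_ORDER if f in best}
-- ===== Notes on version B (the rewrite author's own statement) =====
-- stated objective: alternative
-- what changed: Replaces A's field-by-field scan of the nested WD14 map (testing every alias against the lowered tag set) with a flat precomputed inverted alias->(field,value,priority) index and a single pass over the lowered tags that keeps, per field, the hit with the lowest map-position priority.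
import Mathlib
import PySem

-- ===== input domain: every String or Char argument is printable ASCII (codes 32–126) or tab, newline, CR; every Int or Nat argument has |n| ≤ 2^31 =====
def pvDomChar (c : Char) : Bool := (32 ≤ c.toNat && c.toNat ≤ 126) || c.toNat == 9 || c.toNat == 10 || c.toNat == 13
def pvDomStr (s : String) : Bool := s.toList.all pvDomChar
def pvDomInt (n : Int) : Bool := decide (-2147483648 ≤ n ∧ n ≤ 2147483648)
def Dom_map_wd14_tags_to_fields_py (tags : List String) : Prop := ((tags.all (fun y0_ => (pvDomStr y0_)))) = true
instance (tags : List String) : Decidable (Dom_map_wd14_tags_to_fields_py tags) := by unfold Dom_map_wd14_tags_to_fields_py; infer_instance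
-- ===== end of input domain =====

-- B replaces A's field-by-field scan of the nested WD14 map with a flat precomputed inverted
-- alias index and one pass over the lowered tags (objective: alternative decomposition, same cost).

-- ===== PORT A =====
-- A's module-level data: WD14_TAG_MAP as an association list (dict convention) and DNA_FIELD_ORDER.
def pvWD14 : List (String × List (String × List String)) :=
  [ ("hairColor",
      [ ("黑色", ["black_hair"]), ("棕色", ["brown_hair"]), ("金色", ["blonde_hair"]),
        ("银色", ["silver_hair", "grey_hair", "gray_hair"]), ("粉色", ["pink_hair"]),
        ("蓝色", ["blue_hair"]), ("红色", ["red_hair"]), ("紫色", ["purple_hair"]),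
        ("白色", ["white_hair"]) ]),
    ("eyeColor",
      [ ("棕色", ["brown_eyes"]), ("蓝色", ["blue_eyes"]), ("绿色", ["green_eyes"]),
        ("红色", ["red_eyes"]), ("紫色", ["purple_eyes", "violet_eyes"]),
        ("金色", ["golden_eyes", "yellow_eyes"]), ("灰色", ["gray_eyes", "grey_eyes"]) ]),
    ("skinTone",
      [ ("白皙", ["fair_skin", "pale_skin"]), ("自然", ["skin"]),
        ("小麦色", ["tan_skin"]), ("深色", ["dark_skin"]) ]),
    ("bodyType",
      [ ("纤细", ["slim", "slender"]), ("匀称", ["average_build"]), ("高挑", ["tall"]),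
        ("健美", ["muscular", "athletic"]), ("娇小", ["petite", "short_stature"]) ]),
    ("style",
      [ ("二次元", ["anime"]), ("写实", ["realistic"]), ("半写实", ["semi_realistic"]),
        ("3D", ["3d", "render"]), ("赛博朋克", ["cyberpunk"]), ("国风", ["chinese_style", "ink_style"]) ]) ]

def pvOrder : List String := ["hairColor", "eyeColor", "skinTone", "bodyType", "style"]

-- A's inner 'for value, aliases in tag_map.items(): if any(...): ...; break' loop.
def pvFirstMatchA (lowered : PySem.Set String) : List (String × List String) → Option String
  | [] => none
  | (v, al) :: rest =>
    if al.any (fun a => PySem.Set.contains lowered a) then some v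
    else pvFirstMatchA lowered rest

def map_wd14_tags_to_fields_py (tags : List String) : List (String × String) :=
  let lowered : PySem.Set String := PySem.Set.ofList (tags.map PySem.Str.lower)
  -- WD14_TAG_MAP[field_key]: the key is always present, so the total getD [] is exact here.
  let mapped := pvOrder.foldl
    (fun (m : PySem.Dict String String) fk =>
      match pvFirstMatchA lowered ((PySem.Dict.ofList pvWD14).getD fk []) with
      | some v => m.insert fk v
      | none => m)
    PySem.Dict.empty
  mapped.items

-- ===== PORT B =====
-- Source B's module-level _ALIAS_INDEX literal: alias -> (field_key, value, priority).
def pvAliasIndex : List (String × (String × String × Int)) :=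
  [ ("black_hair", ("hairColor", "黑色", 0)),
    ("brown_hair", ("hairColor", "棕色", 1)),
    ("blonde_hair", ("hairColor", "金色", 2)),
    ("silver_hair", ("hairColor", "银色", 3)),
    ("grey_hair", ("hairColor", "银色", 3)),
    ("gray_hair", ("hairColor", "银色", 3)),
    ("pink_hair", ("hairColor", "粉色", 4)),
    ("blue_hair", ("hairColor", "蓝色", 5)),
    ("red_hair", ("hairColor", "红色", 6)),
    ("purple_hair", ("hairColor", "紫色", 7)),
    ("white_hair", ("hairColor", "白色", 8)),
    ("brown_eyes", ("eyeColor", "棕色", 0)),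
    ("blue_eyes", ("eyeColor", "蓝色", 1)),
    ("green_eyes", ("eyeColor", "绿色", 2)),
    ("red_eyes", ("eyeColor", "红色", 3)),
    ("purple_eyes", ("eyeColor", "紫色", 4)),
    ("violet_eyes", ("eyeColor", "紫色", 4)),
    ("golden_eyes", ("eyeColor", "金色", 5)),
    ("yellow_eyes", ("eyeColor", "金色", 5)),
    ("gray_eyes", ("eyeColor", "灰色", 6)),
    ("grey_eyes", ("eyeColor", "灰色", 6)),
    ("fair_skin", ("skinTone", "白皙", 0)),
    ("pale_skin", ("skinTone", "白皙", 0)),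
    ("skin", ("skinTone", "自然", 1)),
    ("tan_skin", ("skinTone", "小麦色", 2)),
    ("dark_skin", ("skinTone", "深色", 3)),
    ("slim", ("bodyType", "纤细", 0)),
    ("slender", ("bodyType", "纤细", 0)),
    ("average_build", ("bodyType", "匀称", 1)),
    ("tall", ("bodyType", "高挑", 2)),
    ("muscular", ("bodyType", "健美", 3)),
    ("athletic", ("bodyType", "健美", 3)),
    ("petite", ("bodyType", "娇小", 4)),
    ("short_stature", ("bodyType", "娇小", 4)),
    ("anime", ("style", "二次元", 0)),
    ("realistic", ("style", "写实", 1)),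
    ("semi_realistic", ("style", "半写实", 2)),
    ("3d", ("style", "3D", 3)),
    ("render", ("style", "3D", 3)),
    ("cyberpunk", ("style", "赛博朋克", 4)),
    ("chinese_style", ("style", "国风", 5)),
    ("ink_style", ("style", "国风", 5)) ]

-- Source B's own DNA_FIELD_ORDER literal.
def pvFieldsB : List String := ["hairColor", "eyeColor", "skinTone", "bodyType", "style"]

-- one loop-body step: _ALIAS_INDEX.get(tag) and the best-priority update.
def pvStepB (b : PySem.Dict String (String × Int)) (tag : String) : PySem.Dict String (String × Int) :=
  match (pvAliasIndex.find? (fun e => e.1 == tag)).map (·.2) with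
  | none => b
  | some (fk, v, p) =>
    match b.get? fk with
    | none => b.insert fk (v, p)
    | some cur => if p < cur.2 then b.insert fk (v, p) else b

-- Source B iterates the set {t.lower() for t in tags}; its result is independent of the set's
-- iteration order (strict '<' on priorities; equal priorities carry the same value), so the
-- Set's insertion order used here is exact.
def map_wd14_tags_to_fields_py_alt (tags : List String) : List (String × String) :=
  let lowered : PySem.Set String := PySem.Set.ofList (tags.map PySem.Str.lower)
  let best := lowered.foldl pvStepB PySem.Dict.empty
  -- the final dict comprehension {f: best[f][0] for f in DNA_FIELD_ORDER if f in best}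
  (pvFieldsB.filter (fun f => (best.get? f).isSome)).map
    (fun f => (f, ((best.get? f).getD ("", 0)).1))

-- ===== PRECONDITION & SPEC =====
def Spec_map_wd14_tags_to_fields_py (tags : List String) (out : List (String × String)) : Prop := out = map_wd14_tags_to_fields_py_alt tags
instance (tags : List String) (out : List (String × String)) : Decidable (Spec_map_wd14_tags_to_fields_py tags out) := by unfold Spec_map_wd14_tags_to_fields_py; infer_instance

-- ===== CLAIM (what is proved, stated in full; the proofs are below) =====
def Claim_equal_map_wd14_tags_to_fields_py : Prop := ∀ (tags : List String), Dom_map_wd14_tags_to_fields_py tags → Spec_map_wd14_tags_to_fields_py tags (map_wd14_tags_to_fields_py tags)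

-- ===== LEMMAS AND PROOFS =====

-- proof-side construction of the inverted index from A's table, and the bridge to B's literal
def pvSeg (fk : String) (vs : List (String × List String)) : List (String × (String × String × Int)) :=
  (PySem.List.enumerate vs 0).flatMap (fun pe => pe.2.2.map (fun a => (a, (fk, pe.2.1, pe.1))))

theorem pvAliasIndex_eq : pvAliasIndex = pvWD14.flatMap (fun fp => pvSeg fp.1 fp.2) := by decide

-- proof-side view of B's lookup, restricted to one field
def pvLook (t : String) : Option (String × String × Int) :=
  (pvAliasIndex.find? (fun e => e.1 == t)).map (·.2)

def pvRestrictF (fk t : String) : Option (String × Int) :=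
  match pvLook t with
  | some (g, v, p) => if g == fk then some (v, p) else none
  | none => none

-- the same restriction over an arbitrary field table
def pvRestrictG (fields : List (String × List (String × List String))) (fk t : String) : Option (String × Int) :=
  match ((fields.flatMap (fun fp => pvSeg fp.1 fp.2)).find? (fun e => e.1 == t)).map (·.2) with
  | some (g, v, p) => if g == fk then some (v, p) else none
  | none => none

def pvHits (fk : String) (L : List String) : List (String × Int) :=
  L.filterMap (pvRestrictF fk)

def pvMinStep (acc : Option (String × Int)) (h : String × Int) : Option (String × Int) :=
  match acc with
  | none => some h
  | some c => if h.2 < c.2 then some h else acc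

def pvMin (acc : Option (String × Int)) (l : List (String × Int)) : Option (String × Int) :=
  l.foldl pvMinStep acc

-- per-field lookup by scanning the field's value list with its running index
def pvAuxS : List (String × List String) → Int → String → Option (String × Int)
  | [], _, _ => none
  | (v, al) :: rest, s, t => if t ∈ al then some (v, s) else pvAuxS rest (s + 1) t

theorem pvAuxS_le (t : String) : ∀ (vs : List (String × List String)) (s : Int) (h : String × Int),
    pvAuxS vs s t = some h → s ≤ h.2 := by
  intro vs
  induction vs with
  | nil => intro s h hx; simp [pvAuxS] at hx
  | cons p rest ih =>
    intro s h hx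
    obtain ⟨v, al⟩ := p
    simp only [pvAuxS] at hx
    split_ifs at hx with hmem
    · obtain rfl := Option.some.inj hx; simp
    · have := ih (s + 1) h hx; omega

theorem pvAuxS_mem (t : String) : ∀ (vs : List (String × List String)) (s : Int) (h : String × Int),
    pvAuxS vs s t = some h → t ∈ vs.flatMap (·.2) := by
  intro vs
  induction vs with
  | nil => intro s h hx; simp [pvAuxS] at hx
  | cons p rest ih =>
    intro s h hx
    obtain ⟨v, al⟩ := p
    simp only [pvAuxS] at hx
    split_ifs at hx with hmem
    · simp [hmem]
    · have := ih (s + 1) h hx; simp only [List.flatMap_cons, List.mem_append]; right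
      simpa using this

theorem pvAuxS_none (t : String) : ∀ (vs : List (String × List String)) (s : Int),
    t ∉ vs.flatMap (·.2) → pvAuxS vs s t = none := by
  intro vs
  induction vs with
  | nil => intro s _; rfl
  | cons p rest ih =>
    intro s hn
    obtain ⟨v, al⟩ := p
    simp only [List.flatMap_cons, List.mem_append] at hn
    rw [not_or] at hn
    simp only [pvAuxS, if_neg hn.1]
    exact ih (s + 1) (by simpa using hn.2)

theorem pvAuxS_shift (t : String) : ∀ (vs : List (String × List String)) (s : Int),
    pvAuxS vs (s + 1) t = (pvAuxS vs s t).map (fun c => (c.1, c.2 + 1)) := by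
  intro vs
  induction vs with
  | nil => intro s; rfl
  | cons p rest ih =>
    intro s
    obtain ⟨v, al⟩ := p
    by_cases hmem : t ∈ al
    · simp [pvAuxS, hmem]
    · simp only [pvAuxS, if_neg hmem]
      exact ih (s + 1)

theorem find?_map_block (t : String) (x : String × String × Int) : ∀ (al : List String),
    ((al.map (fun a => (a, x))).find? (fun e => e.1 == t)) = if t ∈ al then some (t, x) else none := by
  intro al
  induction al with
  | nil => rfl
  | cons a al ih =>
    by_cases h : a = t
    · subst h; simp
    · have hb : (a == t) = false := by simpa using h
      simp only [List.map_cons, List.find?_cons, hb]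
      rw [ih]
      by_cases hm : t ∈ al
      · simp [hm]
      · have hta : ¬ t = a := fun hh => h hh.symm
        simp [hm, hta]

theorem find?_seg (fk t : String) : ∀ (vs : List (String × List String)) (s : Int),
    (((PySem.List.enumerate vs s).flatMap (fun pe => pe.2.2.map (fun a => (a, (fk, pe.2.1, pe.1))))).find? (fun e => e.1 == t))
      = (pvAuxS vs s t).map (fun c => (t, (fk, c.1, c.2))) := by
  intro vs
  induction vs with
  | nil => intro s; simp [PySem.List.enumerate_nil, pvAuxS]
  | cons p rest ih =>
    intro s
    obtain ⟨v, al⟩ := p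
    rw [PySem.List.enumerate_cons]
    simp only [List.flatMap_cons]
    rw [List.find?_append, find?_map_block]
    by_cases hm : t ∈ al
    · simp [pvAuxS, hm]
    · simp only [pvAuxS, if_neg hm, Option.none_or]
      exact ih (s + 1)

theorem glook_field (t : String) : ∀ (fields : List (String × List (String × List String))) (e : String × (String × String × Int)),
    ((fields.flatMap (fun fp => pvSeg fp.1 fp.2)).find? (fun x => x.1 == t)) = some e → e.2.1 ∈ fields.map (·.1) := by
  intro fields
  induction fields with
  | nil => intro e h; simp at h
  | cons fp rest ih =>
    intro e h
    rw [List.flatMap_cons, List.find?_append] at h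
    rcases hseg : ((pvSeg fp.1 fp.2).find? (fun x => x.1 == t)) with _ | e'
    · rw [hseg, Option.none_or] at h
      simp only [List.map_cons, List.mem_cons]
      right; exact ih e h
    · rw [hseg, Option.some_or] at h
      obtain rfl := Option.some.inj h
      have hseg' := hseg
      rw [pvSeg, find?_seg] at hseg'
      rcases hx : pvAuxS fp.2 0 t with _ | c
      · rw [hx] at hseg'; simp at hseg'
      · rw [hx] at hseg'
        simp only [Option.map_some] at hseg'
        obtain rfl := Option.some.inj hseg'
        simp

theorem pvRestrictG_eq (t : String) : ∀ (fields : List (String × List (String × List String))) (fk : String) (vs : List (String × List String)),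
    (fk, vs) ∈ fields →
    (fields.flatMap (fun fp => fp.2.flatMap (·.2))).Nodup →
    (fields.map (·.1)).Nodup →
    pvRestrictG fields fk t = pvAuxS vs 0 t := by
  intro fields
  induction fields with
  | nil => intro fk vs hmem _ _; simp at hmem
  | cons fp rest ih =>
    intro fk vs hmem hnd hfnd
    obtain ⟨g, ws⟩ := fp
    rw [List.flatMap_cons] at hnd
    rw [List.nodup_append] at hnd
    obtain ⟨-, hndrest, hdisj⟩ := hnd
    rw [List.map_cons, List.nodup_cons] at hfnd
    obtain ⟨hgout, hfndrest⟩ := hfnd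
    unfold pvRestrictG
    rw [List.flatMap_cons, List.find?_append]
    rcases List.mem_cons.mp hmem with heq | hmemtail
    · -- head field: fk = g, vs = ws
      have h1 : fk = g := (Prod.ext_iff.mp heq).1
      have h2 : vs = ws := (Prod.ext_iff.mp heq).2
      rw [h1, h2]
      rcases hx : pvAuxS ws 0 t with _ | c
      · rw [pvSeg, find?_seg, hx]
        simp only [Option.map_none, Option.none_or]
        rcases hrest : ((rest.flatMap (fun fp => pvSeg fp.1 fp.2)).find? (fun e => e.1 == t)) with _ | e
        · try rw [hrest]
          rfl
        · have hfmem := glook_field t rest e hrest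
          have hne : e.2.1 ≠ g := fun hh => hgout (hh ▸ hfmem)
          try rw [hrest]
          obtain ⟨ea, g', v', p'⟩ := e
          have hbe : (g' == g) = false := by simpa using hne
          simp [hbe]
      · rw [pvSeg, find?_seg, hx]
        simp
    · -- fk lives in rest
      rcases hx : pvAuxS ws 0 t with _ | c
      · rw [pvSeg, find?_seg, hx]
        simp only [Option.map_none, Option.none_or]
        exact ih fk vs hmemtail hndrest hfndrest
      · -- head segment hits, so t is a head alias, hence not an alias of vs
        rw [pvSeg, find?_seg, hx]
        have htw : t ∈ ws.flatMap (·.2) := pvAuxS_mem t ws 0 c hx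
        have htrest : t ∉ rest.flatMap (fun fp => fp.2.flatMap (·.2)) := fun hh => hdisj t htw t hh rfl
        have htvs : t ∉ vs.flatMap (·.2) := by
          intro hh
          exact htrest (List.mem_flatMap.mpr ⟨(fk, vs), hmemtail, hh⟩)
        rw [pvAuxS_none t vs 0 htvs]
        have hgfk : g ≠ fk := by
          intro hh
          exact hgout (hh ▸ List.mem_map.mpr ⟨(fk, vs), hmemtail, rfl⟩)
        have hbe2 : (g == fk) = false := by simpa using hgfk
        simp [hbe2]

theorem pvWD14_alias_nodup : (pvWD14.flatMap (fun fp => fp.2.flatMap (·.2))).Nodup := by decide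

theorem pvWD14_field_nodup : (pvWD14.map (·.1)).Nodup := by decide

theorem pvMinStep_shift (acc : Option (String × Int)) (h : String × Int) :
    pvMinStep (acc.map (fun c => (c.1, c.2 + 1))) (h.1, h.2 + 1) = (pvMinStep acc h).map (fun c => (c.1, c.2 + 1)) := by
  rcases acc with _ | c
  · rfl
  · simp only [Option.map_some, pvMinStep]
    by_cases hp : h.2 < c.2
    · rw [if_pos (by omega : (h.1, h.2 + 1).2 < (c.1, c.2 + 1).2), if_pos hp]
      rfl
    · rw [if_neg (by simp; omega : ¬ (h.1, h.2 + 1).2 < (c.1, c.2 + 1).2), if_neg hp]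
      rfl

theorem pvMin_shift : ∀ (l : List (String × Int)) (acc : Option (String × Int)),
    pvMin (acc.map (fun c => (c.1, c.2 + 1))) (l.map (fun c => (c.1, c.2 + 1))) = (pvMin acc l).map (fun c => (c.1, c.2 + 1)) := by
  intro l
  induction l with
  | nil => intro acc; rfl
  | cons h tl ih =>
    intro acc
    simp only [List.map_cons, pvMin, List.foldl_cons]
    rw [pvMinStep_shift acc h]
    exact ih (pvMinStep acc h)

theorem pvMin_zero (v : String) : ∀ (l : List (String × Int)) (acc : Option (String × Int)),
    (∀ h ∈ l, 0 ≤ h.2 ∧ (h.2 = 0 → h.1 = v)) →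
    (∀ c, acc = some c → 0 ≤ c.2 ∧ (c.2 = 0 → c.1 = v)) →
    ((∃ h ∈ l, h.2 = 0) ∨ (∃ c, acc = some c ∧ c.2 = 0)) →
    (pvMin acc l).map (·.1) = some v := by
  intro l
  induction l with
  | nil =>
    intro acc _ hacc hex
    rcases hex with ⟨h, hm, _⟩ | ⟨c, hc, hc0⟩
    · simp at hm
    · subst hc
      have h1 := (hacc c rfl).2 hc0
      show (Option.map (·.1) (some c)) = some v
      simp [h1]
  | cons h tl ih =>
    intro acc hall hacc hex
    simp only [pvMin, List.foldl_cons]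
    have hhead := hall h (List.mem_cons_self ..)
    have hacc' : ∀ c, pvMinStep acc h = some c → 0 ≤ c.2 ∧ (c.2 = 0 → c.1 = v) := by
      intro c hc
      rcases acc with _ | c0
      · obtain rfl := Option.some.inj hc; exact hhead
      · simp only [pvMinStep] at hc
        split_ifs at hc with hlt
        · obtain rfl := Option.some.inj hc; exact hhead
        · obtain rfl := Option.some.inj hc; exact hacc c0 rfl
    refine ih (pvMinStep acc h) (fun x hx => hall x (List.mem_cons_of_mem _ hx)) hacc' ?_
    rcases hex with ⟨h', hm', h0'⟩ | ⟨c0, hc0, hc00⟩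
    · rcases List.mem_cons.mp hm' with rfl | hm''
      · right
        rcases acc with _ | c0
        · exact ⟨h', rfl, h0'⟩
        · simp only [pvMinStep]
          split_ifs with hlt
          · exact ⟨h', rfl, h0'⟩
          · refine ⟨c0, rfl, ?_⟩
            have := (hacc c0 rfl).1
            omega
      · exact Or.inl ⟨h', hm'', h0'⟩
    · subst hc0
      right
      simp only [pvMinStep]
      split_ifs with hlt
      · exact absurd hlt (by omega)
      · exact ⟨c0, rfl, hc00⟩

theorem core_min_eq_first : ∀ (vs : List (String × List String)) (L : List String),
    (pvMin none (L.filterMap (fun t => pvAuxS vs 0 t))).map (·.1) = pvFirstMatchA L vs := by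
  intro vs
  induction vs with
  | nil => intro L; simp [pvAuxS, pvFirstMatchA, pvMin]
  | cons p rest ih =>
    intro L
    obtain ⟨v, al⟩ := p
    by_cases hc : ∃ a ∈ al, a ∈ L
    · have hA : pvFirstMatchA L ((v, al) :: rest) = some v := by
        simp only [pvFirstMatchA]
        rw [if_pos]
        simp only [List.any_eq_true]
        obtain ⟨a, hal, haL⟩ := hc
        exact ⟨a, hal, by simpa using haL⟩
      rw [hA]
      apply pvMin_zero v
      · intro h hm
        rcases List.mem_filterMap.mp hm with ⟨t, _, hsome⟩
        simp only [pvAuxS] at hsome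
        split_ifs at hsome with hmem
        · obtain rfl := Option.some.inj hsome; simp
        · have := pvAuxS_le t rest 1 h hsome
          exact ⟨by omega, by omega⟩
      · intro c hc'; simp at hc'
      · left
        obtain ⟨a, hal, haL⟩ := hc
        exact ⟨(v, 0), List.mem_filterMap.mpr ⟨a, haL, by simp [pvAuxS, hal]⟩, rfl⟩
    · have hA : pvFirstMatchA L ((v, al) :: rest) = pvFirstMatchA L rest := by
        simp only [pvFirstMatchA]
        rw [if_neg]
        simp only [List.any_eq_true]
        rintro ⟨a, hal, haL⟩
        exact hc ⟨a, hal, by simpa using haL⟩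
      rw [hA, ← ih L]
      have hfm : L.filterMap (fun t => pvAuxS ((v, al) :: rest) 0 t)
          = (L.filterMap (fun t => pvAuxS rest 0 t)).map (fun c => (c.1, c.2 + 1)) := by
        rw [List.map_filterMap]
        apply List.filterMap_congr
        intro t htL
        have hnot : t ∉ al := fun hmem => hc ⟨t, hmem, htL⟩
        simp only [pvAuxS, if_neg hnot]
        exact pvAuxS_shift t rest 0
      rw [hfm]
      rw [show (none : Option (String × Int)) = (none : Option (String × Int)).map (fun c => (c.1, c.2 + 1)) from rfl]
      rw [pvMin_shift]
      have hmm : ∀ o : Option (String × Int), (o.map (fun c => (c.1, c.2 + 1))).map (·.1) = o.map (·.1) := by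
        intro o; cases o <;> rfl
      rw [hmm]
      rfl

theorem hits_eq_field (fk : String) (vs : List (String × List String))
    (hmem : (fk, vs) ∈ pvWD14) :
    ∀ L, pvHits fk L = L.filterMap (fun t => pvAuxS vs 0 t) := by
  intro L
  unfold pvHits
  apply List.filterMap_congr
  intro t _
  have hG : pvRestrictF fk t = pvRestrictG pvWD14 fk t := by
    unfold pvRestrictF pvLook pvRestrictG
    rw [pvAliasIndex_eq]
    rfl
  rw [hG, pvRestrictG_eq t pvWD14 fk vs hmem pvWD14_alias_nodup pvWD14_field_nodup]

theorem get?_foldl_stepB : ∀ (L : List String) (b : PySem.Dict String (String × Int)) (fk : String),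
    (L.foldl pvStepB b).get? fk = pvMin (b.get? fk) (pvHits fk L) := by
  intro L
  induction L with
  | nil => intro b fk; rfl
  | cons t L ih =>
    intro b fk
    have hstep : (pvStepB b t).get? fk =
        match pvRestrictF fk t with
        | some h => pvMinStep (b.get? fk) h
        | none => b.get? fk := by
      unfold pvStepB pvRestrictF pvLook
      rcases hl : (pvAliasIndex.find? (fun e => e.1 == t)).map (·.2) with _ | ⟨g, v, p⟩
      · rw [hl]
      · rw [hl]
        by_cases hg : g = fk
        · subst hg
          simp only [beq_self_eq_true, if_true]
          rcases hb : b.get? g with _ | cur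
          · simp [pvMinStep, PySem.Dict.get?_insert_self]
          · by_cases hp : p < cur.2
            · simp [pvMinStep, hp, PySem.Dict.get?_insert_self]
            · simp [pvMinStep, hp, hb]
        · have hbe : (g == fk) = false := by simpa using hg
          have hne : fk ≠ g := fun hh => hg hh.symm
          simp only [hbe]
          rcases hb : b.get? g with _ | cur
          · simp [PySem.Dict.get?_insert_of_ne _ _ hne]
          · by_cases hp : p < cur.2
            · simp [hp, PySem.Dict.get?_insert_of_ne _ _ hne]
            · simp [hp]
    show ((L.foldl pvStepB (pvStepB b t)).get? fk) = pvMin (b.get? fk) (pvHits fk (t :: L))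
    rw [ih (pvStepB b t) fk, hstep]
    simp only [pvHits, List.filterMap_cons]
    rcases hr : pvRestrictF fk t with _ | h
    · rfl
    · rfl

theorem items_foldl_cond (r : String → Option String) :
    ∀ (order : List String) (m : PySem.Dict String String),
    (∀ f ∈ order, m.contains f = false) → order.Nodup →
    (order.foldl (fun m fk => match r fk with | some v => m.insert fk v | none => m) m).items
      = m.items ++ order.filterMap (fun f => (r f).map (fun v => (f, v))) := by
  intro order
  induction order with
  | nil => intro m _ _; simp
  | cons f rest ih =>
    intro m hfresh hnd
    rw [List.nodup_cons] at hnd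
    simp only [List.foldl_cons, List.filterMap_cons]
    rcases hr : r f with _ | v
    · rw [ih m (fun g hg => hfresh g (List.mem_cons_of_mem _ hg)) hnd.2]
      simp
    · have hfr : m.contains f = false := hfresh f (List.mem_cons_self ..)
      have items' : (m.insert f v).items = m.items ++ [(f, v)] :=
        PySem.Dict.items_insert_of_not_contains m v hfr
      have fresh' : ∀ g ∈ rest, (m.insert f v).contains g = false := by
        intro g hg
        have hgf : g ≠ f := fun hh => hnd.1 (hh ▸ hg)
        have hbe : (g == f) = false := by simpa using hgf
        rw [PySem.Dict.contains_insert, hbe, Bool.false_or]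
        exact hfresh g (List.mem_cons_of_mem _ hg)
      rw [ih (m.insert f v) fresh' hnd.2, items']
      simp

theorem filter_map_eq_filterMap {α β : Type} (p : α → Bool) (g : α → β) :
    ∀ l : List α, (l.filter p).map g = l.filterMap (fun x => if p x then some (g x) else none) := by
  intro l
  induction l with
  | nil => rfl
  | cons a l ih => by_cases h : p a <;> simp [h, ih]

-- ===== VERDICT (by name: the statement is the Claim_ definition above) =====
theorem map_wd14_tags_to_fields_py_spec : Claim_equal_map_wd14_tags_to_fields_py := by
  intro tags _
  unfold Spec_map_wd14_tags_to_fields_py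
  show map_wd14_tags_to_fields_py tags = map_wd14_tags_to_fields_py_alt tags
  unfold map_wd14_tags_to_fields_py map_wd14_tags_to_fields_py_alt
  rw [show pvFieldsB = pvOrder from rfl]
  set L : PySem.Set String := PySem.Set.ofList (tags.map PySem.Str.lower) with hLdef
  set best := L.foldl pvStepB PySem.Dict.empty with hbest
  have hB : ∀ f ∈ pvOrder, (best.get? f).map (·.1) = pvFirstMatchA L ((PySem.Dict.ofList pvWD14).getD f []) := by
    intro f hf
    rw [hbest, get?_foldl_stepB, PySem.Dict.get?_empty]
    simp only [pvOrder, List.mem_cons, List.not_mem_nil, or_false] at hf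
    rcases hf with rfl | rfl | rfl | rfl | rfl
    · rw [hits_eq_field "hairColor" ((PySem.Dict.ofList pvWD14).getD "hairColor" []) (by decide)]
      exact core_min_eq_first _ _
    · rw [hits_eq_field "eyeColor" ((PySem.Dict.ofList pvWD14).getD "eyeColor" []) (by decide)]
      exact core_min_eq_first _ _
    · rw [hits_eq_field "skinTone" ((PySem.Dict.ofList pvWD14).getD "skinTone" []) (by decide)]
      exact core_min_eq_first _ _
    · rw [hits_eq_field "bodyType" ((PySem.Dict.ofList pvWD14).getD "bodyType" []) (by decide)]
      exact core_min_eq_first _ _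
    · rw [hits_eq_field "style" ((PySem.Dict.ofList pvWD14).getD "style" []) (by decide)]
      exact core_min_eq_first _ _
  rw [items_foldl_cond (fun fk => pvFirstMatchA L ((PySem.Dict.ofList pvWD14).getD fk [])) pvOrder
    PySem.Dict.empty (fun f _ => by simp [PySem.Dict.contains_empty]) (by decide)]
  rw [show (PySem.Dict.empty : PySem.Dict String String).items = [] from rfl, List.nil_append]
  rw [filter_map_eq_filterMap]
  apply List.filterMap_congr
  intro f hf
  have h := hB f hf
  rcases hg : best.get? f with _ | c
  · rw [hg] at h
    simp only [Option.map_none] at h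
    rw [← h]
    simp
  · rw [hg] at h
    simp only [Option.map_some] at h
    rw [← h]
    simp
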